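-- pv_equiv track=rewrite | github.com/jeganpillai/python_reference | p0078_consecutive_available_seats.py | Grow_With_Data
-- ===== SOURCE A (Python) =====
-- def Grow_With_Data(cinema):
--     max_length = 0
--     max_start_seat = None
--     max_end_seat = None
--
--     current_length = 0
--     start_seat = None
--     end_seat = None
--
--     for seat_id, free in cinema:
--         if free == 1:
--             if current_length == 0:
--                 start_seat = seat_id
--             current_length += 1
--             end_seat = seat_id
--         else:
--             if current_length > max_length:
--                 max_length = current_length
--                 max_start_seat = start_seat
--                 max_end_seat = end_seat
--             current_length = 0
--
--     if current_length > max_length: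
--         max_length = current_length
--         max_start_seat = start_seat
--         max_end_seat = end_seat
--
--     return (max_start_seat, max_end_seat, max_length)
-- ===== SOURCE B (Python) =====
-- def Grow_With_Data(cinema):
--     # Phase 1: collect all maximal runs of free seats as (start, end, length).
--     runs = []
--     i, n = 0, len(cinema)
--     while i < n:
--         seat, free = cinema[i]
--         if free == 1:
--             j = i + 1
--             while j < n and cinema[j][1] == 1:
--                 j += 1
--             runs.append((seat, cinema[j - 1][0], j - i))
--             i = j
--         else:
--             i += 1
--     # Phase 2: pick the first longest run (strict > keeps the earliest).
--     best = (None, None, 0)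
--     for s, e, length in runs:
--         if length > best[2]:
--             best = (s, e, length)
--     return best
-- ===== Notes on version B (the rewrite author's own statement) =====
-- stated objective: alternative
-- what changed: Replaces A's single-pass six-variable state machine by a two-phase decomposition: first split the list into maximal free runs as (start,end,length) triples, then select the first longest run with a simple strict-greater fold.
import Mathlib
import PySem

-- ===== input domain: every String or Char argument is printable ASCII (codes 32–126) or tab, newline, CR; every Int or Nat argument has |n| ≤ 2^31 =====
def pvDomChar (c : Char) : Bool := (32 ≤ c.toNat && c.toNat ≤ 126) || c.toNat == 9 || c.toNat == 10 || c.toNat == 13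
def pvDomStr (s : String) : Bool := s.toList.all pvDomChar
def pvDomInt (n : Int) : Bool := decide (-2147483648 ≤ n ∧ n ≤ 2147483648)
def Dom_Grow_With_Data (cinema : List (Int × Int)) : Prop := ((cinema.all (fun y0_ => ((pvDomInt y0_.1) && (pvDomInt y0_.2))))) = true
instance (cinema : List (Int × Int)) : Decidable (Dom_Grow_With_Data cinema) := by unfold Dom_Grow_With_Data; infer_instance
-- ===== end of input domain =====

-- B replaces A's single-pass state machine by a two-phase decomposition (collect maximal
-- free runs, then pick the first longest); same O(n) cost, objective: alternative.

-- ===== PORT A =====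
-- loop state of A: (max_length, max_start_seat, max_end_seat, current_length, start_seat, end_seat)
structure StA where
  maxL : Int
  maxS : Option Int
  maxE : Option Int
  curL : Int
  s : Option Int
  e : Option Int
deriving Repr, DecidableEq

def stepA (st : StA) (p : Int × Int) : StA :=
  if p.2 == 1 then
    { st with
      s := if st.curL == 0 then some p.1 else st.s,
      curL := st.curL + 1,
      e := some p.1 }
  else
    if st.curL > st.maxL then
      { maxL := st.curL, maxS := st.s, maxE := st.e, curL := 0, s := st.s, e := st.e }
    else
      { st with curL := 0 }

def Grow_With_Data (cinema : List (Int × Int)) : Option Int × Option Int × Int :=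
  let st := cinema.foldl stepA ⟨0, none, none, 0, none, none⟩
  if st.curL > st.maxL then (st.s, st.e, st.curL) else (st.maxS, st.maxE, st.maxL)

-- ===== PORT B =====
-- the inner `while j < n and cinema[j][1] == 1` prefix of free seats
def takeRun : List (Int × Int) → List (Int × Int)
  | [] => []
  | p :: t => if p.2 == 1 then p :: takeRun t else []

def dropRun : List (Int × Int) → List (Int × Int)
  | [] => []
  | p :: t => if p.2 == 1 then dropRun t else p :: t

theorem dropRun_length_le (l : List (Int × Int)) : (dropRun l).length ≤ l.length := by
  induction l with
  | nil => simp [dropRun]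
  | cons p t ih => simp only [dropRun]; split <;> simp only [List.length_cons] <;> omega

-- Phase 1 of B: the list of maximal free runs as (start, end, length)
def runsB : List (Int × Int) → List (Int × Int × Int)
  | [] => []
  | (a, f) :: t =>
    if f == 1 then
      let run := takeRun t
      (a, ((run.getLast?.map Prod.fst).getD a, 1 + (run.length : Int))) :: runsB (dropRun t)
    else
      runsB t
termination_by l => l.length
decreasing_by
  · exact Nat.lt_succ_of_le (dropRun_length_le t)
  · exact Nat.lt_succ_of_le (Nat.le_refl _)

-- Phase 2 of B: first longest run (strict > keeps the earliest)
def bestStep (b : Option Int × Option Int × Int) (r : Int × Int × Int) :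
    Option Int × Option Int × Int :=
  if r.2.2 > b.2.2 then (some r.1, some r.2.1, r.2.2) else b

def Grow_With_Data_alt (cinema : List (Int × Int)) : Option Int × Option Int × Int :=
  (runsB cinema).foldl bestStep (none, none, 0)

-- ===== PRECONDITION & SPEC =====
def Spec_Grow_With_Data (cinema : List (Int × Int)) (out : Option Int × Option Int × Int) : Prop := out = Grow_With_Data_alt cinema
instance (cinema : List (Int × Int)) (out : Option Int × Option Int × Int) : Decidable (Spec_Grow_With_Data cinema out) := by unfold Spec_Grow_With_Data; infer_instance

-- ===== CLAIM (what is proved, stated in full; the proofs are below) =====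
def Claim_equal_Grow_With_Data : Prop := ∀ (cinema : List (Int × Int)), Dom_Grow_With_Data cinema → Spec_Grow_With_Data cinema (Grow_With_Data cinema)

-- ===== LEMMAS AND PROOFS =====

theorem takeRun_free (l : List (Int × Int)) : ∀ p ∈ takeRun l, p.2 = 1 := by
  induction l with
  | nil => simp [takeRun]
  | cons q t ih =>
    simp only [takeRun]
    split
    · rename_i h
      intro p hp
      rcases List.mem_cons.mp hp with rfl | hp
      · exact eq_of_beq h
      · exact ih p hp
    · simp

theorem takeRun_append_dropRun (l : List (Int × Int)) :
    takeRun l ++ dropRun l = l := by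
  induction l with
  | nil => simp [takeRun, dropRun]
  | cons q t ih =>
    simp only [takeRun, dropRun]
    split <;> simp [ih]

theorem dropRun_busy (l : List (Int × Int)) :
    dropRun l = [] ∨ ∃ b g t, dropRun l = (b, g) :: t ∧ (g == 1) = false := by
  induction l with
  | nil => simp [dropRun]
  | cons q t ih =>
    simp only [dropRun]
    split
    · exact ih
    · rename_i h
      exact Or.inr ⟨q.1, q.2, t, by simp, by simpa using h⟩

-- stepping A through an all-free list while already inside a run
theorem foldRun (l : List (Int × Int)) (hfree : ∀ p ∈ l, p.2 = 1) :
    ∀ st : StA, 0 < st.curL →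
    l.foldl stepA st =
      { st with curL := st.curL + l.length,
                e := match l.getLast? with | none => st.e | some p => some p.1 } := by
  induction l with
  | nil => intro st h; simp
  | cons q t ih =>
    intro st h
    have hq : q.2 = 1 := hfree q (List.mem_cons_self ..)
    have hcur : (st.curL == 0) = false := by simp; omega
    simp only [List.foldl_cons, stepA, hq, hcur, beq_self_eq_true, if_true,
      Bool.false_eq_true, if_false]
    rw [ih (fun p hp => hfree p (List.mem_cons_of_mem _ hp)) _ (by simp; omega)]
    cases t with
    | nil => simp
    | cons r u =>
      have : (q :: r :: u).getLast? = (r :: u).getLast? := by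
        simp [List.getLast?_cons_cons]
      simp only [this]
      cases hgl : (r :: u).getLast? with
      | none => exact absurd (List.getLast?_eq_none_iff.mp hgl) (by simp)
      | some p => simp; omega

-- main invariant: finishing A's fold from a run boundary equals B's best-fold seeded
-- with the current maximum
theorem mainLemma : ∀ n (rest : List (Int × Int)), rest.length ≤ n →
    ∀ (mL : Int) (mS mE s e : Option Int), 0 ≤ mL →
    (let st := rest.foldl stepA ⟨mL, mS, mE, 0, s, e⟩
     if st.curL > st.maxL then (st.s, st.e, st.curL) else (st.maxS, st.maxE, st.maxL)) =
    (runsB rest).foldl bestStep (mS, mE, mL) := by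
  intro n
  induction n with
  | zero =>
    intro rest hlen mL mS mE s e hm
    have : rest = [] := List.length_eq_zero_iff.mp (Nat.le_zero.mp hlen)
    subst this
    simp [runsB]
    omega
  | succ n ih =>
    intro rest hlen mL mS mE s e hm
    cases rest with
    | nil => simp [runsB]; omega
    | cons q t =>
      obtain ⟨a, f⟩ := q
      by_cases hf : (f == 1) = true
      · -- head starts a free run
        have hsplit := takeRun_append_dropRun t
        have hfree := takeRun_free t
        -- first step
        simp only [List.foldl_cons, stepA, hf, if_true]
        norm_num
        set st1 : StA := ⟨mL, mS, mE, 1, some a, some a⟩ with hst1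
        -- fold over the run prefix
        rw [← hsplit, List.foldl_append]
        have hrun := foldRun (takeRun t) hfree st1 (by simp [hst1])
        rw [hrun]
        set k : Int := ((takeRun t).length : Int) with hk
        set lastE : Option Int :=
          (match (takeRun t).getLast? with | none => st1.e | some p => some p.1) with hlast
        have hlastE : lastE = some (((takeRun t).getLast?.map Prod.fst).getD a) := by
          rw [hlast]
          cases (takeRun t).getLast? <;> simp [hst1]
        set st2 : StA := ⟨mL, mS, mE, 1 + k, some a, lastE⟩ with hst2
        have hrunsB : runsB ((a, f) :: (takeRun t ++ dropRun t)) =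
            (a, (((takeRun t).getLast?.map Prod.fst).getD a, 1 + k)) :: runsB (dropRun t) := by
          rw [hsplit]; simp [runsB, hf, hk]
        rw [hrunsB]
        have hk0 : 0 ≤ k := by simp [hk]
        rcases dropRun_busy t with hb | ⟨b, g, t', hbt, hg⟩
        · -- run reaches the end of the list
          rw [hb]
          simp only [List.foldl_nil, runsB, List.foldl_cons, bestStep]
          by_cases hcmp : 1 + k > mL
          · simp only [hst2]
            rw [if_pos (by simpa using hcmp), if_pos (by simp; omega)]
            simp [hlastE]
          · simp only [hst2]
            rw [if_neg (by simpa using hcmp), if_neg (by simp; omega)]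
        · -- run ends at a busy seat
          rw [hbt]
          simp only [List.foldl_cons]
          have hstep : stepA st2 (b, g) =
              if 1 + k > mL then ⟨1 + k, some a, lastE, 0, some a, lastE⟩
              else ⟨mL, mS, mE, 0, some a, lastE⟩ := by
            simp only [stepA, hg, hst2]
            split <;> simp_all
          rw [hstep]
          have hlen' : t'.length ≤ n := by
            have h1 : (dropRun t).length ≤ t.length := dropRun_length_le t
            rw [hbt] at h1
            simp at h1 hlen
            omega
          have hrunsB' : runsB ((b, g) :: t') = runsB t' := by simp [runsB, hg]
          by_cases hcmp : 1 + k > mL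
          · rw [if_pos hcmp]
            rw [ih t' hlen' (1 + k) (some a) lastE (some a) lastE (by omega)]
            simp only [bestStep]
            rw [if_pos (by simp; omega), hlastE, ← hrunsB', ← hbt]
          · rw [if_neg hcmp]
            rw [ih t' hlen' mL mS mE (some a) lastE hm]
            simp only [bestStep]
            rw [if_neg (by simp; omega), ← hrunsB', ← hbt]
      · -- busy head with no pending run: state unchanged, run list unchanged
        have hstep : stepA ⟨mL, mS, mE, 0, s, e⟩ (a, f) = ⟨mL, mS, mE, 0, s, e⟩ := by
          simp only [stepA, hf]
          rw [if_neg (by simp_all), if_neg (by simp; omega)]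
        have hrunsB : runsB ((a, f) :: t) = runsB t := by
          simp [runsB, hf]
        simp only [List.foldl_cons, hstep, hrunsB]
        exact ih t (by simp at hlen; omega) mL mS mE s e hm

-- ===== VERDICT (by name: the statement is the Claim_ definition above) =====
theorem Grow_With_Data_spec : Claim_equal_Grow_With_Data := by
  intro cinema _
  unfold Spec_Grow_With_Data Grow_With_Data Grow_With_Data_alt
  exact mainLemma cinema.length cinema (Nat.le_refl _) 0 none none none none (by omega)
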